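-- pv_equiv track=rewrite | github.com/joooshc/MiscibilityML | Extraction/ddb_extraction/DDBscraperJ.py | url_cleaner
-- ===== SOURCE A (Python) =====
-- def url_cleaner(new_urls): #Removes the urls that are not needed, and cleans the rest
--     while None in new_urls:
--         new_urls.remove(None)
--     list2 = [x for x in new_urls if not "#" in x]
--     list3 = [sub.replace(" ", "%20") for sub in list2]
--     list4 = [x for x in list3 if not "ddb" in x]
--     del list4[0]
--     return list4
-- ===== SOURCE B (Python) =====
-- def url_cleaner(new_urls):  # single fused pass instead of three sequential comprehensions; keeps A's in-place None removal
--     new_urls[:] = [x for x in new_urls if x is not None]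
--     result = []
--     for x in new_urls:
--         if "#" in x:
--             continue
--         x = x.replace(" ", "%20")
--         if "ddb" in x:
--             continue
--         result.append(x)
--     del result[0]
--     return result
-- ===== Notes on version B (the rewrite author's own statement) =====
-- stated objective: faster
-- what changed: Replaces A's quadratic repeated remove(None) with a single comprehension rebinding new_urls in place, and fuses A's three sequential comprehensions (filter '#', replace spaces, filter 'ddb') into one loop with a single result accumulator; the final del result[0] is kept.
import Mathlib
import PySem

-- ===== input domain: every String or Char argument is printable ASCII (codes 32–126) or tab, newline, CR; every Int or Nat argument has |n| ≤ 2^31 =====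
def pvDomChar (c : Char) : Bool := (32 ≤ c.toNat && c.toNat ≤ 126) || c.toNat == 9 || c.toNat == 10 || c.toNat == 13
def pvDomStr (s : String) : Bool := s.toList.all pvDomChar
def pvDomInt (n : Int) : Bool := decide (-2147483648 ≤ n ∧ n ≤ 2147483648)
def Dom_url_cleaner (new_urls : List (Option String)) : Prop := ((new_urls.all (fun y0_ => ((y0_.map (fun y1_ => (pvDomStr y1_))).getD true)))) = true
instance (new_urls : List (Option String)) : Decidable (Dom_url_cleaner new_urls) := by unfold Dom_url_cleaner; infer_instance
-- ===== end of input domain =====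

-- B fuses A's three comprehensions into one loop with a single accumulator; the in-place None
-- removal mutates the argument in both Pythons (the equivalence proved is about the return value).

-- ===== PORT A =====
def url_cleaner (new_urls : List (Option String)) : List String :=
  -- while None in new_urls: new_urls.remove(None)  → all Nones removed, order kept
  let cleaned := new_urls.filterMap id
  let list2 := cleaned.filter (fun x => !(PySem.Str.isIn "#" x))
  let list3 := list2.map (fun sub => PySem.Str.replace sub " " "%20")
  let list4 := list3.filter (fun x => !(PySem.Str.isIn "ddb" x))
  -- del list4[0] : IndexError when list4 = [], excluded by Pre_
  list4.drop 1

-- ===== PORT B =====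
def url_cleaner_alt (new_urls : List (Option String)) : List String :=
  -- new_urls[:] = [x for x in new_urls if x is not None]
  let kept := new_urls.filterMap id
  -- single fused pass with one accumulator
  let result := kept.foldl (fun acc x =>
    if PySem.Str.isIn "#" x then acc
    else
      let x := PySem.Str.replace x " " "%20"
      if PySem.Str.isIn "ddb" x then acc
      else acc ++ [x]) []
  -- del result[0] : IndexError when result = [], excluded by Pre_
  result.drop 1

-- ===== PRECONDITION & SPEC =====
-- Pre_ excludes exactly the inputs where both Pythons raise IndexError at `del ...[0]`:
-- no surviving element (a non-None url without '#' whose space-escaped form lacks 'ddb').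
def Pre_url_cleaner (new_urls : List (Option String)) : Prop :=
  (new_urls.any (fun o => match o with
    | none => false
    | some s => !(PySem.Str.isIn "#" s) && !(PySem.Str.isIn "ddb" (PySem.Str.replace s " " "%20")))) = true
instance (new_urls : List (Option String)) : Decidable (Pre_url_cleaner new_urls) := by unfold Pre_url_cleaner; infer_instance

def pvWitness_url_cleaner : List (Option String) := [some "a b", none, some "x#y"]

def Spec_url_cleaner (new_urls : List (Option String)) (out : List String) : Prop := out = url_cleaner_alt new_urls
instance (new_urls : List (Option String)) (out : List String) : Decidable (Spec_url_cleaner new_urls out) := by unfold Spec_url_cleaner; infer_instance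

-- ===== CLAIM (what is proved, stated in full; the proofs are below) =====
def Claim_equal_url_cleaner : Prop := ∀ (new_urls : List (Option String)), Dom_url_cleaner new_urls → Pre_url_cleaner new_urls → Spec_url_cleaner new_urls (url_cleaner new_urls)

-- ===== LEMMAS AND PROOFS =====

-- the fused loop equals the filter/map/filter pipeline
theorem fused_eq (l : List String) (acc : List String) :
    l.foldl (fun acc x =>
      if PySem.Str.isIn "#" x then acc
      else
        let x := PySem.Str.replace x " " "%20"
        if PySem.Str.isIn "ddb" x then acc
        else acc ++ [x]) acc
    = acc ++ (((l.filter (fun x => !(PySem.Str.isIn "#" x))).map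
        (fun sub => PySem.Str.replace sub " " "%20")).filter
        (fun x => !(PySem.Str.isIn "ddb" x))) := by
  induction l generalizing acc with
  | nil => simp
  | cons h t ih =>
    rw [List.foldl_cons, ih]
    by_cases h1 : PySem.Str.isIn "#" h
    · simp at h1; simp [h1]
    · simp at h1
      by_cases h2 : PySem.Str.isIn "ddb" (PySem.Str.replace h " " "%20")
      · simp at h2; simp [h1, h2]
      · simp at h2; simp [h1, h2]

-- ===== VERDICT (by name: the statement is the Claim_ definition above) =====
theorem url_cleaner_spec : Claim_equal_url_cleaner := by
  intro new_urls _ _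
  unfold Spec_url_cleaner url_cleaner url_cleaner_alt
  simp only [fused_eq, List.nil_append]
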